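-- pv_equiv track=rewrite | github.com/ommakadiya/Hackerrank | XOR Matrix.py | xorMatrix
-- ===== SOURCE A (Python) =====
-- def apply_shift(A, shift, n):
--     B = [0] * n
--     for i in range(n):
--         B[i] = A[i] ^ A[(i + shift) % n]
--     return B
--
-- def xorMatrix(m, first_row):
--     n = len(first_row)
--
--     # If m = 1, no transformation needed
--     if m == 1:
--         return first_row
--
--     # Precompute 1, 2, 4, 8... shifts (for binary exponentiation)
--     shifts = []
--     x = 1
--     while x < m:
--         shifts.append(x)
--         x <<= 1
--
--     ans = first_row[:]
--     target = m - 1  # we want T^(m-1)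
--
--     i = 0
--     while target > 0:
--         if target & 1:
--             ans = apply_shift(ans, shifts[i], n)
--
--         # Next power: shift doubles
--         shifts[i] = (shifts[i] * 2) % n
--
--         target >>= 1
--         i += 1
--
--     return ans
-- ===== SOURCE B (Python) =====
-- def xorMatrix(m, first_row):
--     n = len(first_row)
--     mask = m - 1
--     if mask <= 0:
--         return list(first_row)
--     # coefficients of (1+x)^mask mod (x^n - 1) over GF(2), computed by
--     # square-and-multiply over the bits of mask (most significant first)
--     q = [0] * n
--     q[0] = 1
--     for bit in bin(mask)[2:]:
--         r = [0] * n
--         for c in range(n):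
--             if q[c]:
--                 r[2 * c % n] ^= 1
--         q = r
--         if bit == '1':
--             q = [q[c] ^ q[c - 1] for c in range(n)]
--     out = []
--     for i in range(n):
--         acc = 0
--         for c in range(n):
--             if q[c]:
--                 acc ^= first_row[(i + c) % n]
--         out.append(acc)
--     return out
-- ===== Notes on version B (the rewrite author's own statement) =====
-- stated objective: alternative
-- what changed: B computes the coefficient polynomial (1+x)^(m-1) mod (x^n-1) over GF(2) by square-and-multiply over the bits of m-1 (a squaring map c -> 2c mod n on coefficients, then an optional multiply by 1+x), and produces each output entry by one XOR gather pass over the row, instead of A's repeated XOR-shift passes applied directly to the row with a mutable shifts table.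
import Mathlib
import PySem

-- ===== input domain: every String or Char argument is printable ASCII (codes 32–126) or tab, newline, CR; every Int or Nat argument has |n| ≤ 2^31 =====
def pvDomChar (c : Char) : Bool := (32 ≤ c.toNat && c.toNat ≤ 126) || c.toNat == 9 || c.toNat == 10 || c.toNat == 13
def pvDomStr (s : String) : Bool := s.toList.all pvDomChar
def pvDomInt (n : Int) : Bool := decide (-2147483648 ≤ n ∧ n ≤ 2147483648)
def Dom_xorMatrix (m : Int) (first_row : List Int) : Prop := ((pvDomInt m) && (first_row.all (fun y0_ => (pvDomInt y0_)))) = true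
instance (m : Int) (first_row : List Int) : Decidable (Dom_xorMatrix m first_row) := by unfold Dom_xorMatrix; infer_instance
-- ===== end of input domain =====

-- B replaces A's row-level binary exponentiation by computing the coefficient polynomial
-- (1+x)^(m-1) mod (x^n-1) over GF(2) by square-and-multiply over the bits of m-1, followed by
-- one XOR gather pass per output index: an alternative algorithm with the same exact behaviour.

-- ===== PORT A =====
def applyShift (A : List Int) (shift : Int) (n : Int) : List Int :=
  (PySem.List.pyRange 0 n 1).map (fun i =>
    PySem.Int.bxor (PySem.List.pyGetD A i 0) (PySem.List.pyGetD A (PySem.Int.mod (i + shift) n) 0))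

def buildShifts (i : Nat) (m : Int) : List Int :=
  if (2:Int)^i < m then (2:Int)^i :: buildShifts (i+1) m else []
termination_by (m - 2^i).toNat
decreasing_by
  have h1 : (0:Int) < 2^i := pow_pos (by norm_num) i
  have h2 : (2:Int)^(i+1) = 2^i * 2 := pow_succ 2 i
  omega

def loopA (ans shifts : List Int) (n target : Int) (i : Nat) : List Int :=
  if 0 < target then
    let s := shifts.getD i 0
    let ans' := if target % 2 = 1 then applyShift ans s n else ans
    loopA ans' (shifts.set i (PySem.Int.mod (s * 2) n)) n (target / 2) (i + 1)
  else ans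
termination_by target.toNat
decreasing_by omega

def xorMatrix (m : Int) (first_row : List Int) : List Int :=
  if m = 1 then first_row
  else loopA first_row (buildShifts 0 m) (first_row.length : Int) (m - 1) 0

-- ===== PORT B =====
def bitsOf (e : Nat) : List Bool :=
  if e = 0 then [] else bitsOf (e / 2) ++ [decide (e % 2 = 1)]

def sqStep (q : List Int) (n : Nat) : List Int :=
  (List.range n).foldl (fun r c =>
    if q.getD c 0 ≠ 0 then r.set (2 * c % n) (PySem.Int.bxor (r.getD (2 * c % n) 0) 1) else r)
    (List.replicate n 0)

def mulStep (q : List Int) (n : Nat) : List Int :=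
  (List.range n).map (fun c => PySem.Int.bxor (q.getD c 0) (PySem.List.pyGetD q ((c : Int) - 1) 0))

def gatherRow (first_row q : List Int) (n : Nat) : List Int :=
  (List.range n).map (fun i =>
    (List.range n).foldl (fun acc c =>
      if q.getD c 0 ≠ 0 then PySem.Int.bxor acc (first_row.getD ((i + c) % n) 0) else acc) 0)

def xorMatrix_alt (m : Int) (first_row : List Int) : List Int :=
  let n := first_row.length
  let mask := m - 1
  if mask ≤ 0 then first_row
  else
    let q0 := (List.replicate n (0:Int)).set 0 1
    let q := (bitsOf mask.toNat).foldl (fun q b =>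
      let q := sqStep q n
      if b then mulStep q n else q) q0
    gatherRow first_row q n

-- ===== PRECONDITION & SPEC =====
-- Pre_ excludes exactly the inputs where the Python A raises ZeroDivisionError
-- ('% n' with n = 0): m ≥ 2 together with an empty first_row.  (Python B raises there too.)
def Pre_xorMatrix (m : Int) (first_row : List Int) : Prop := m ≤ 1 ∨ first_row ≠ []
instance (m : Int) (first_row : List Int) : Decidable (Pre_xorMatrix m first_row) := by
  unfold Pre_xorMatrix; infer_instance

def pvWitness_xorMatrix : Int × List Int := (6, [3, 1, 4, 1, 5])

def Spec_xorMatrix (m : Int) (first_row : List Int) (out : List Int) : Prop := out = xorMatrix_alt m first_row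
instance (m : Int) (first_row : List Int) (out : List Int) : Decidable (Spec_xorMatrix m first_row out) := by unfold Spec_xorMatrix; infer_instance

-- ===== CLAIM (what is proved, stated in full; the proofs are below) =====
def Claim_equal_xorMatrix : Prop := ∀ (m : Int) (first_row : List Int), Dom_xorMatrix m first_row → Pre_xorMatrix m first_row → Spec_xorMatrix m first_row (xorMatrix m first_row)

-- ===== LEMMAS AND PROOFS =====

-- xor algebra for PySem.Int.bxor

def pymag (a : Int) : Nat := if 0 ≤ a then a.toNat else (-a-1).toNat

theorem bxor_shape (a b : Int) : PySem.Int.bxor a b =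
    (if (decide (a < 0)).xor (decide (b < 0)) then -((pymag a ^^^ pymag b : Nat) : Int) - 1
     else ((pymag a ^^^ pymag b : Nat) : Int)) := by
  unfold PySem.Int.bxor pymag
  split_ifs with h1 h2 h2 <;> simp_all <;> omega

theorem pymag_shape (s : Bool) (k : Nat) :
    pymag (if s then -(k : Int) - 1 else (k : Int)) = k := by
  cases s <;> simp [pymag] <;> omega

theorem neg_shape (s : Bool) (k : Nat) :
    decide ((if s then -(k : Int) - 1 else (k : Int)) < 0) = s := by
  cases s <;> simp <;> omega

theorem bxor_assoc (a b c : Int) :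
    PySem.Int.bxor (PySem.Int.bxor a b) c = PySem.Int.bxor a (PySem.Int.bxor b c) := by
  rw [bxor_shape a b, bxor_shape b c, bxor_shape _ c, bxor_shape a _,
      pymag_shape, pymag_shape, neg_shape, neg_shape]
  rw [Bool.xor_assoc, Nat.xor_assoc]

theorem bxor_zero' (a : Int) : PySem.Int.bxor a 0 = a := by simp [pysem]
theorem zero_bxor' (a : Int) : PySem.Int.bxor 0 a = a := by
  rw [PySem.Int.bxor_comm]; exact bxor_zero' a
theorem bxor_self' (a : Int) : PySem.Int.bxor a a = 0 := by simp [pysem]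

-- ===== xor-fold toolkit =====
def ixf (l : List Nat) (f : Nat → Int) : Int := l.foldr (fun c a => PySem.Int.bxor (f c) a) 0
def bxf (l : List Nat) (p : Nat → Bool) : Bool := l.foldr (fun c a => (p c).xor a) false

theorem ixf_nil (f : Nat → Int) : ixf [] f = 0 := rfl
theorem ixf_cons (x : Nat) (xs : List Nat) (f : Nat → Int) :
    ixf (x :: xs) f = PySem.Int.bxor (f x) (ixf xs f) := rfl
theorem bxf_cons (x : Nat) (xs : List Nat) (p : Nat → Bool) :
    bxf (x :: xs) p = (p x).xor (bxf xs p) := rfl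

theorem ixf_congr {l : List Nat} {f g : Nat → Int} (h : ∀ c ∈ l, f c = g c) : ixf l f = ixf l g := by
  induction l with
  | nil => rfl
  | cons x xs ih =>
      rw [ixf_cons, ixf_cons, h x (by simp), ih (fun c hc => h c (by simp [hc]))]

theorem ixf_add (l : List Nat) (f g : Nat → Int) :
    ixf l (fun c => PySem.Int.bxor (f c) (g c)) = PySem.Int.bxor (ixf l f) (ixf l g) := by
  induction l with
  | nil => simp [ixf, bxor_zero']
  | cons x xs ih =>
      rw [ixf_cons, ixf_cons, ixf_cons, ih]
      rw [bxor_assoc, ← bxor_assoc (g x), PySem.Int.bxor_comm (g x), bxor_assoc, ← bxor_assoc]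

theorem ixf_perm {l l' : List Nat} (h : l.Perm l') (f : Nat → Int) : ixf l f = ixf l' f := by
  induction h with
  | nil => rfl
  | cons x _ ih => rw [ixf_cons, ixf_cons, ih]
  | swap x y l => rw [ixf_cons, ixf_cons, ixf_cons, ixf_cons, ← bxor_assoc, ← bxor_assoc,
      PySem.Int.bxor_comm (f y)]
  | trans _ _ ih1 ih2 => rw [ih1, ih2]

theorem ixf_map (l : List Nat) (h : Nat → Nat) (f : Nat → Int) :
    ixf (l.map h) f = ixf l (fun c => f (h c)) := by
  simp [ixf, List.foldr_map]

theorem ixf_zero {l : List Nat} {f : Nat → Int} (h : ∀ c ∈ l, f c = 0) : ixf l f = 0 := by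
  induction l with
  | nil => rfl
  | cons x xs ih =>
      rw [ixf_cons, h x (by simp), ih (fun c hc => h c (by simp [hc])), bxor_zero']

theorem ixf_single {l : List Nat} {f : Nat → Int} {c0 : Nat} (hnd : l.Nodup) (hc0 : c0 ∈ l)
    (hz : ∀ c ∈ l, c ≠ c0 → f c = 0) : ixf l f = f c0 := by
  induction l with
  | nil => cases hc0
  | cons x xs ih =>
      simp only [List.nodup_cons] at hnd
      rw [ixf_cons]
      rcases List.mem_cons.mp hc0 with h | h
      · subst h
        rw [ixf_zero (fun c hc => hz c (by simp [hc]) (fun he => hnd.1 (he ▸ hc))), bxor_zero']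
      · rw [show f x = 0 from hz x (by simp) (fun he => hnd.1 (he ▸ h)), zero_bxor']
        exact ih hnd.2 h (fun c hc hne => hz c (by simp [hc]) hne)

theorem bxf_congr {l : List Nat} {p q : Nat → Bool} (h : ∀ c ∈ l, p c = q c) : bxf l p = bxf l q := by
  induction l with
  | nil => rfl
  | cons x xs ih =>
      rw [bxf_cons, bxf_cons, h x (by simp), ih (fun c hc => h c (by simp [hc]))]

theorem bxf_add (l : List Nat) (p q : Nat → Bool) :
    bxf l (fun c => (p c).xor (q c)) = (bxf l p).xor (bxf l q) := by
  induction l with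
  | nil => simp [bxf]
  | cons x xs ih =>
      rw [bxf_cons, bxf_cons, bxf_cons, ih]
      cases p x <;> cases q x <;> cases bxf xs p <;> cases bxf xs q <;> simp

theorem bxf_perm {l l' : List Nat} (h : l.Perm l') (p : Nat → Bool) : bxf l p = bxf l' p := by
  induction h with
  | nil => rfl
  | cons x _ ih => rw [bxf_cons, bxf_cons, ih]
  | swap x y l =>
      rw [bxf_cons, bxf_cons, bxf_cons, bxf_cons]
      cases p x <;> cases p y <;> cases bxf l p <;> simp
  | trans _ _ ih1 ih2 => rw [ih1, ih2]

theorem bxf_map (l : List Nat) (h : Nat → Nat) (p : Nat → Bool) :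
    bxf (l.map h) p = bxf l (fun c => p (h c)) := by
  simp [bxf, List.foldr_map]

theorem bxf_append_singleton (l : List Nat) (k : Nat) (p : Nat → Bool) :
    bxf (l ++ [k]) p = (bxf l p).xor (p k) := by
  induction l with
  | nil => simp [bxf]
  | cons x xs ih =>
      rw [List.cons_append, bxf_cons, bxf_cons, ih]
      cases p x <;> cases bxf xs p <;> cases p k <;> simp

theorem bxf_zero {l : List Nat} {p : Nat → Bool} (h : ∀ c ∈ l, p c = false) : bxf l p = false := by
  induction l with
  | nil => rfl
  | cons x xs ih =>
      rw [bxf_cons, h x (by simp), ih (fun c hc => h c (by simp [hc])), Bool.false_xor]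

theorem bxf_single {l : List Nat} {p : Nat → Bool} {c0 : Nat} (hnd : l.Nodup) (hc0 : c0 ∈ l)
    (hz : ∀ c ∈ l, c ≠ c0 → p c = false) : bxf l p = p c0 := by
  induction l with
  | nil => cases hc0
  | cons x xs ih =>
      simp only [List.nodup_cons] at hnd
      rw [bxf_cons]
      rcases List.mem_cons.mp hc0 with h | h
      · subst h
        rw [bxf_zero (fun c hc => hz c (by simp [hc]) (fun he => hnd.1 (he ▸ hc))), Bool.xor_false]
      · rw [show p x = false from hz x (by simp) (fun he => hnd.1 (he ▸ h)), Bool.false_xor]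
        exact ih hnd.2 h (fun c hc hne => hz c (by simp [hc]) hne)

theorem add_mod_inj {n x y s : Nat} (hx : x < n) (hy : y < n) (h : (x + s) % n = (y + s) % n) :
    x = y := by
  have h1 : x ≡ y [MOD n] := Nat.ModEq.add_right_cancel' s h
  have h2 : x % n = y % n := h1
  rw [Nat.mod_eq_of_lt hx, Nat.mod_eq_of_lt hy] at h2
  exact h2

-- rotation c ↦ (c+s) % n is a permutation of range n
theorem rotperm (n s : Nat) (hn : 0 < n) :
    ((List.range n).map (fun c => (c + s) % n)).Perm (List.range n) := by
  have hnd : ((List.range n).map (fun c => (c + s) % n)).Nodup := by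
    refine List.Nodup.map_on ?_ (List.nodup_range)
    intro x hx y hy hxy
    simp only [List.mem_range] at hx hy
    exact add_mod_inj hx hy hxy
  refine (List.perm_ext_iff_of_nodup hnd List.nodup_range).mpr ?_
  intro d
  simp only [List.mem_map, List.mem_range]
  constructor
  · rintro ⟨c, _, rfl⟩; exact Nat.mod_lt _ hn
  · intro hd
    refine ⟨(d + (n - s % n)) % n, Nat.mod_lt _ hn, ?_⟩
    have hs : s % n < n := Nat.mod_lt _ hn
    rw [Nat.mod_add_mod]
    have he : d + (n - s % n) + s = d + n + n * (s / n) := by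
      have := Nat.div_add_mod s n; omega
    rw [he, Nat.add_mul_mod_self_left, Nat.add_mod_right, Nat.mod_eq_of_lt hd]

-- ===== GF(2) cyclic polynomial carrier =====
def rotf (n s : Nat) (q : Nat → Bool) : Nat → Bool := fun c => q ((c + s) % n)
def addf (q q' : Nat → Bool) : Nat → Bool := fun c => (q c).xor (q' c)
def sqf (n : Nat) (q : Nat → Bool) : Nat → Bool :=
  fun c => bxf (List.range n) (fun c' => decide (2 * c' % n = c) && q c')
def pwf (n : Nat) : Nat → (Nat → Bool)
  | 0 => fun c => decide (c = 0)
  | e + 1 => addf (pwf n e) (rotf n (n - 1) (pwf n e))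

def Eqn (n : Nat) (q q' : Nat → Bool) : Prop := ∀ c < n, q c = q' c

theorem Eqn.refl (n : Nat) (q : Nat → Bool) : Eqn n q q := fun _ _ => rfl
theorem Eqn.symm' {n : Nat} {q q' : Nat → Bool} (h : Eqn n q q') : Eqn n q' q :=
  fun c hc => (h c hc).symm
theorem Eqn.trans' {n : Nat} {q q' q'' : Nat → Bool} (h1 : Eqn n q q') (h2 : Eqn n q' q'') :
    Eqn n q q'' := fun c hc => (h1 c hc).trans (h2 c hc)

theorem rotf_congr_mod {n a b : Nat} (h : a % n = b % n) (q : Nat → Bool) :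
    rotf n a q = rotf n b q := by
  funext c
  simp only [rotf]
  rw [Nat.add_mod c a, Nat.add_mod c b, h]

theorem addf_congr {n : Nat} {q1 q2 q1' q2' : Nat → Bool} (h1 : Eqn n q1 q1') (h2 : Eqn n q2 q2') :
    Eqn n (addf q1 q2) (addf q1' q2') := by
  intro c hc
  simp only [addf, h1 c hc, h2 c hc]

theorem rotf_preserves {n : Nat} (hn : 0 < n) (a : Nat) {q q' : Nat → Bool} (h : Eqn n q q') :
    Eqn n (rotf n a q) (rotf n a q') := by
  intro c hc
  simp only [rotf]
  exact h _ (Nat.mod_lt _ hn)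

-- (q + x^t q) + x^t (q + x^t q) = q + x^{2t} q   (char 2)
theorem xmsq (n t : Nat) (q : Nat → Bool) :
    Eqn n (addf (addf q (rotf n t q)) (rotf n t (addf q (rotf n t q))))
          (addf q (rotf n (t + t) q)) := by
  intro c hc
  simp only [addf, rotf, Nat.mod_add_mod]
  rw [show c + t + t = c + (t + t) from by omega]
  cases q c <;> cases q ((c + t) % n) <;> cases q ((c + (t + t)) % n) <;> simp

theorem nsub_one_mod (n : Nat) (hn : 0 < n) : (n - 1) % n = (n - 1 % n) % n := by
  rcases Nat.lt_or_ge 1 n with h | h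
  · rw [Nat.mod_eq_of_lt h]
  · have : n = 1 := by omega
    subst this
    rfl

theorem two_nsub_mod {n a : Nat} (hn : 0 < n) (ha : a < n) :
    (n - a + (n - a)) % n = (n - 2 * a % n) % n := by
  rcases Nat.lt_or_ge (2 * a) n with h | h
  · rw [Nat.mod_eq_of_lt h]
    rw [show n - a + (n - a) = n + (n - 2 * a) from by omega, Nat.add_mod_left]
  · have h2 : 2 * a % n = 2 * a - n := by
      rw [Nat.mod_eq_sub_mod h, Nat.mod_eq_of_lt (by omega)]
    rw [h2, show n - a + (n - a) = n - (2 * a - n) from by omega]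

-- P1: (1+x)^(e+2^i) = (1+x)^e · (1 + x^{2^i})
theorem pw_pow_step (n : Nat) (hn : 0 < n) :
    ∀ (i e : Nat), Eqn n (pwf n (e + 2 ^ i))
      (addf (pwf n e) (rotf n (n - 2 ^ i % n) (pwf n e))) := by
  intro i
  induction i with
  | zero =>
      intro e
      rw [pow_zero]
      show Eqn n (pwf n (e + 1)) _
      have : pwf n (e + 1) = addf (pwf n e) (rotf n (n - 1) (pwf n e)) := rfl
      rw [this, rotf_congr_mod (nsub_one_mod n hn) (pwf n e)]
      exact Eqn.refl n _
  | succ i ih =>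
      intro e
      have h1 : e + 2 ^ (i + 1) = (e + 2 ^ i) + 2 ^ i := by rw [pow_succ]; omega
      rw [h1]
      refine (ih (e + 2 ^ i)).trans' ?_
      refine (addf_congr (ih e) (rotf_preserves hn _ (ih e))).trans' ?_
      refine (xmsq n (n - 2 ^ i % n) (pwf n e)).trans' ?_
      refine addf_congr (Eqn.refl n _) ?_
      rw [rotf_congr_mod (a := n - 2 ^ i % n + (n - 2 ^ i % n)) (b := n - 2 ^ (i+1) % n) ?_ (pwf n e)]
      · exact Eqn.refl n _
      · have h2 : 2 * (2 ^ i % n) % n = 2 ^ (i + 1) % n := by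
          have hm : 2 * (2 ^ i % n) ≡ 2 * 2 ^ i [MOD n] := (Nat.mod_modEq (2 ^ i) n).mul_left 2
          have : (2 : Nat) * 2 ^ i = 2 ^ (i + 1) := by rw [pow_succ]; omega
          rw [← this]
          exact hm
        have := two_nsub_mod hn (Nat.mod_lt (2 ^ i) hn)
        rw [h2] at this
        exact this

theorem bxf_reindex {n : Nat} (hn : 0 < n) (s : Nat) (p : Nat → Bool) :
    bxf (List.range n) p = bxf (List.range n) (fun c => p ((c + s) % n)) := by
  rw [← bxf_map (List.range n) (fun c => (c + s) % n) p]
  exact (bxf_perm (rotperm n s hn) p).symm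

theorem sq_addf {n : Nat} (q q' : Nat → Bool) :
    Eqn n (sqf n (addf q q')) (addf (sqf n q) (sqf n q')) := by
  intro c hc
  show bxf _ _ = (bxf _ _).xor (bxf _ _)
  rw [← bxf_add]
  exact bxf_congr (fun c' _ => by simp only [addf, Bool.and_xor_distrib_left])

theorem two_mul_mod (n a : Nat) : 2 * (a % n) % n = 2 * a % n :=
  (Nat.mod_modEq a n).mul_left 2

theorem sq_rotf {n : Nat} (hn : 0 < n) (a : Nat) (q : Nat → Bool) :
    Eqn n (sqf n (rotf n a q)) (rotf n (a + a) (sqf n q)) := by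
  intro c hc
  show bxf _ _ = bxf _ _
  rw [bxf_reindex hn a (fun c' => decide (2 * c' % n = (c + (a + a)) % n) && q c')]
  refine bxf_congr (fun c' hc' => ?_)
  simp only [rotf]
  congr 1
  rw [decide_eq_decide]
  have h1 : 2 * ((c' + a) % n) % n = (2 * c' + 2 * a) % n := by
    rw [two_mul_mod]; congr 1; omega
  rw [h1]
  constructor
  · intro h
    have : 2 * c' % n = c % n := by rw [h, Nat.mod_eq_of_lt hc]
    have h2 : 2 * c' + 2 * a ≡ c + (a + a) [MOD n] := by
      have := (Nat.ModEq.add_right (2 * a) (this : 2 * c' ≡ c [MOD n]))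
      rw [show c + 2 * a = c + (a + a) from by omega] at this
      exact this
    exact h2
  · intro h
    have h2 : 2 * c' + 2 * a ≡ c + 2 * a [MOD n] := by
      rw [show c + 2 * a = c + (a + a) from by omega]
      exact h
    have h3 : 2 * c' ≡ c [MOD n] := h2.add_right_cancel' (2 * a)
    rw [show (2 * c' ≡ c [MOD n]) = (2 * c' % n = c % n) from rfl, Nat.mod_eq_of_lt hc] at h3
    exact h3

theorem pw_frob (n : Nat) (hn : 0 < n) : ∀ e, Eqn n (pwf n (2 * e)) (sqf n (pwf n e)) := by
  intro e
  induction e with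
  | zero =>
      intro c hc
      show decide (c = 0) = bxf _ _
      rw [bxf_single (c0 := 0) List.nodup_range (List.mem_range.mpr hn)
        (fun c' _ hne => by simp [pwf, hne])]
      simp [pwf]
      omega
  | succ e ih =>
      have hL : pwf n (2 * (e + 1)) = addf (addf (pwf n (2*e)) (rotf n (n-1) (pwf n (2*e))))
          (rotf n (n-1) (addf (pwf n (2*e)) (rotf n (n-1) (pwf n (2*e))))) := by
        rw [show 2 * (e + 1) = (2*e + 1) + 1 from by omega]
        rfl
      rw [hL]
      refine (xmsq n (n-1) (pwf n (2*e))).trans' ?_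
      have hR : Eqn n (sqf n (pwf n (e + 1)))
          (addf (sqf n (pwf n e)) (rotf n ((n-1) + (n-1)) (sqf n (pwf n e)))) := by
        refine (sq_addf (pwf n e) (rotf n (n-1) (pwf n e))).trans' ?_
        exact addf_congr (Eqn.refl n _) (sq_rotf hn (n-1) (pwf n e))
      refine Eqn.trans' ?_ hR.symm'
      exact addf_congr ih (rotf_preserves hn _ ih)

-- ===== the gather semantics Gf and its laws =====
def Gf (row : List Int) (q : Nat → Bool) (i : Nat) : Int :=
  ixf (List.range row.length) (fun c => if q c then row.getD ((i + c) % row.length) 0 else 0)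

theorem Gf_congr {row : List Int} {q q' : Nat → Bool} (h : Eqn row.length q q') (i : Nat) :
    Gf row q i = Gf row q' i :=
  ixf_congr (fun c hc => by rw [h c (List.mem_range.mp hc)])

theorem Gf_add (row : List Int) (q q' : Nat → Bool) (i : Nat) :
    Gf row (addf q q') i = PySem.Int.bxor (Gf row q i) (Gf row q' i) := by
  rw [Gf, Gf, Gf, ← ixf_add]
  refine ixf_congr (fun c _ => ?_)
  simp only [addf]
  rcases Bool.eq_false_or_eq_true (q c) with h1 | h1 <;>
  rcases Bool.eq_false_or_eq_true (q' c) with h2 | h2 <;>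
    simp [h1, h2, bxor_zero', zero_bxor', bxor_self']

theorem ixf_reindex {n : Nat} (hn : 0 < n) (s : Nat) (f : Nat → Int) :
    ixf (List.range n) f = ixf (List.range n) (fun c => f ((c + s) % n)) := by
  rw [← ixf_map (List.range n) (fun c => (c + s) % n) f]
  exact (ixf_perm (rotperm n s hn) f).symm

theorem shift_cancel {n : Nat} (hn : 0 < n) (s c : Nat) (hc : c < n) :
    ((c + s) % n + (n - s % n)) % n = c := by
  rw [Nat.mod_add_mod]
  have he : c + s + (n - s % n) = c + n + n * (s / n) := by
    have h1 := Nat.div_add_mod s n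
    have h2 : s % n < n := Nat.mod_lt _ hn
    omega
  rw [he, Nat.add_mul_mod_self_left, Nat.add_mod_right, Nat.mod_eq_of_lt hc]

theorem idx_shift {n : Nat} (i s c : Nat) :
    (i + (c + s) % n) % n = ((i + s) % n + c) % n := by
  have h1 : i + (c + s) % n ≡ i + (c + s) [MOD n] := (Nat.mod_modEq (c + s) n).add_left i
  have h2 : (i + s) % n + c ≡ (i + s) + c [MOD n] := (Nat.mod_modEq (i + s) n).add_right c
  have h3 : i + (c + s) = (i + s) + c := by omega
  calc (i + (c + s) % n) % n = (i + (c + s)) % n := h1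
    _ = ((i + s) + c) % n := by rw [h3]
    _ = ((i + s) % n + c) % n := h2.symm

theorem Gf_rot {row : List Int} (hn : 0 < row.length) (s : Nat) (q : Nat → Bool) (i : Nat) :
    Gf row (rotf row.length (row.length - s % row.length) q) i = Gf row q ((i + s) % row.length) := by
  rw [Gf, Gf, ixf_reindex hn s]
  refine ixf_congr (fun c hc => ?_)
  have hc' : c < row.length := List.mem_range.mp hc
  have e1 := shift_cancel hn s c hc'
  have e2 := idx_shift (n := row.length) i s c
  simp only [rotf, e1, e2]

theorem Gf_pw0 {row : List Int} (hn : 0 < row.length) {i : Nat} (hi : i < row.length) :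
    Gf row (pwf row.length 0) i = row.getD i 0 := by
  rw [Gf, ixf_single (c0 := 0) List.nodup_range (List.mem_range.mpr hn)
    (fun c _ hne => by simp [pwf, hne])]
  simp [pwf, Nat.mod_eq_of_lt hi]

-- ===== A side =====
theorem applyShift_eq (ans : List Int) (n : Nat) (hn : 0 < n) (s : Int) (hs : 0 ≤ s) :
    applyShift ans s (n : Int) =
      (List.range n).map (fun j =>
        PySem.Int.bxor (ans.getD j 0) (ans.getD ((j + s.toNat) % n) 0)) := by
  rw [applyShift, PySem.List.pyRange_zero_natCast, List.map_map]
  refine List.map_congr_left (fun k hk => ?_)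
  have hk' : k < n := List.mem_range.mp hk
  simp only [Function.comp]
  have h1 : PySem.List.pyGetD ans ((k : Int)) 0 = ans.getD k 0 := by
    simp [pysem]
  have h2 : PySem.Int.mod ((k : Int) + s) (n : Int) = (((k + s.toNat) % n : Nat) : Int) := by
    rw [PySem.Int.mod_eq_emod_of_pos (by exact_mod_cast hn)]
    have : (k : Int) + s = (((k + s.toNat : Nat)) : Int) := by omega
    rw [this]
    exact_mod_cast (Int.natCast_mod (k + s.toNat) n).symm
  rw [h1, h2, PySem.List.pyGetD_natCast]

theorem buildShifts_getD (m : Int) : ∀ i j, j < (buildShifts i m).length →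
    (buildShifts i m).getD j 0 = 2 ^ (i + j) := by
  intro i
  induction i using buildShifts.induct m with
  | case1 i h ih =>
      intro j hj
      rw [buildShifts, if_pos h]
      cases j with
      | zero => simp
      | succ j =>
          rw [buildShifts, if_pos h] at hj
          simp only [List.length_cons] at hj
          have := ih j (by omega)
          simp only [List.getD_cons_succ, this]
          congr 1
          omega
  | case2 i h =>
      intro j hj
      rw [buildShifts, if_neg h] at hj
      simp at hj

theorem buildShifts_bound (m : Int) : ∀ i, m ≤ 2 ^ (i + (buildShifts i m).length) := by
  intro i
  induction i using buildShifts.induct m with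
  | case1 i h ih =>
      rw [buildShifts, if_pos h, List.length_cons]
      have : i + (1 + (buildShifts (i+1) m).length) = (i + 1) + (buildShifts (i+1) m).length := by omega
      rw [show i + ((buildShifts (i+1) m).length + 1) = (i + 1) + (buildShifts (i+1) m).length from by omega]
      exact ih
  | case2 i h =>
      rw [buildShifts, if_neg h, List.length_nil]
      push_neg at h
      simpa using h

theorem getD_set_ne (l : List Int) (i j : Nat) (v : Int) (h : j ≠ i) :
    (l.set i v).getD j 0 = l.getD j 0 := by
  simp [List.getD_eq_getElem?_getD, List.getElem?_set_ne (by omega : i ≠ j)]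

theorem loopA_eq (row : List Int) (hn : 0 < row.length) :
    ∀ (fuel : Nat) (t : Int), t.toNat = fuel → 0 ≤ t →
    ∀ (i e : Nat) (shifts : List Int),
      (∀ j, i ≤ j → j < shifts.length → shifts.getD j 0 = 2 ^ j) →
      t < 2 ^ (shifts.length - i) →
      loopA ((List.range row.length).map (Gf row (pwf row.length e))) shifts (row.length : Int) t i
        = (List.range row.length).map (Gf row (pwf row.length (e + t.toNat * 2 ^ i))) := by
  intro fuel
  induction fuel using Nat.strong_induction_on with
  | _ fuel IH =>
    intro t ht ht0 i e shifts hsh hbound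
    rw [loopA]
    by_cases hpos : 0 < t
    · rw [if_pos hpos]
      have hiL : i < shifts.length := by
        by_contra hcon
        push_neg at hcon
        rw [show shifts.length - i = 0 from by omega, pow_zero] at hbound
        omega
      have hs : shifts.getD i 0 = 2 ^ i := hsh i le_rfl hiL
      have hcast : ((2:Int) ^ i) = (((2 ^ i : Nat)) : Int) := by push_cast; ring
      -- the updated ans is the gather of the next polynomial when the bit is set
      have hans : (if t % 2 = 1 then
            applyShift ((List.range row.length).map (Gf row (pwf row.length e))) (shifts.getD i 0) (row.length : Int)
          else ((List.range row.length).map (Gf row (pwf row.length e))))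
          = (List.range row.length).map
              (Gf row (pwf row.length (e + (if t % 2 = 1 then 2 ^ i else 0)))) := by
        by_cases hbit : t % 2 = 1
        · rw [if_pos hbit, if_pos hbit, hs]
          rw [applyShift_eq _ _ hn _ (by positivity)]
          refine List.map_congr_left (fun j hj => ?_)
          have hj' : j < row.length := List.mem_range.mp hj
          have hG : ∀ k, k < row.length →
              ((List.range row.length).map (Gf row (pwf row.length e))).getD k 0
                = Gf row (pwf row.length e) k := fun k hk =>
            PySem.List.getD_map_range _ _ _ _ hk
          rw [hG j hj', hG _ (Nat.mod_lt _ hn)]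
          have htn : ((2:Int) ^ i).toNat = 2 ^ i := by
            rw [hcast]
            exact Int.toNat_natCast _
          rw [htn]
          rw [← Gf_rot hn (2 ^ i) (pwf row.length e) j, ← Gf_add]
          exact (Gf_congr (pw_pow_step row.length hn i e) j).symm
        · rw [if_neg hbit, if_neg hbit, add_zero]
      simp only [hans]
      have hlen : (shifts.set i (PySem.Int.mod (shifts.getD i 0 * 2) (row.length : Int))).length
          = shifts.length := by simp
      have hrec := IH (t / 2).toNat (by omega) (t / 2) rfl (by omega) (i + 1)
        (e + (if t % 2 = 1 then 2 ^ i else 0))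
        (shifts.set i (PySem.Int.mod (shifts.getD i 0 * 2) (row.length : Int)))
        (fun j hji hjl => by
          rw [getD_set_ne _ _ _ _ (by omega)]
          exact hsh j (by omega) (by omega))
        (by
          rw [hlen]
          have hp : (2:Int) ^ (shifts.length - i) = 2 * 2 ^ (shifts.length - (i + 1)) := by
            rw [← pow_succ']
            congr 1
            omega
          have hk : (0:Int) < 2 ^ (shifts.length - (i + 1)) := pow_pos (by norm_num) _
          omega)
      rw [hrec]
      congr 2
      by_cases hbit : t % 2 = 1
      · rw [if_pos hbit]
        have h2 : t.toNat = 2 * (t / 2).toNat + 1 := by omega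
        rw [h2, pow_succ]
        ring
      · rw [if_neg hbit]
        have h2 : t.toNat = 2 * (t / 2).toNat := by omega
        rw [h2, pow_succ]
        ring
    · rw [if_neg hpos]
      have : t.toNat = 0 := by omega
      rw [this]
      simp

theorem row_as_G0 (row : List Int) (hn : 0 < row.length) :
    row = (List.range row.length).map (Gf row (pwf row.length 0)) := by
  refine List.ext_getElem (by simp) (fun j hj hj' => ?_)
  rw [List.getElem_map, List.getElem_range]
  rw [Gf_pw0 hn (by simpa using hj)]
  simp [List.getD_eq_getElem?_getD, List.getElem?_eq_getElem hj]

theorem xorMatrix_char (m : Int) (row : List Int) (hm : 2 ≤ m) (hn : 0 < row.length) :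
    xorMatrix m row = (List.range row.length).map (Gf row (pwf row.length (m - 1).toNat)) := by
  rw [xorMatrix, if_neg (by omega)]
  rw [show loopA row (buildShifts 0 m) ((row.length : Nat) : Int) (m - 1) 0
      = loopA ((List.range row.length).map (Gf row (pwf row.length 0))) (buildShifts 0 m)
          ((row.length : Nat) : Int) (m - 1) 0 from by rw [← row_as_G0 row hn]]
  have hb := buildShifts_bound m 0
  have hbound : (m - 1 : Int) < 2 ^ ((buildShifts 0 m).length - 0) := by
    have : ((2:Int) ^ (0 + (buildShifts 0 m).length)) = 2 ^ ((buildShifts 0 m).length - 0) := by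
      congr 1
      omega
    omega
  rw [loopA_eq row hn (m - 1).toNat (m - 1) rfl (by omega) 0 0 (buildShifts 0 m)
    (fun j hj hjl => by simpa using buildShifts_getD m 0 j hjl) hbound]
  simp

-- ===== B side =====
def QInv (n : Nat) (q : List Int) (P : Nat → Bool) : Prop :=
  q.length = n ∧ ∀ c < n, q.getD c 0 = if P c then 1 else 0

theorem QInv_congr {n : Nat} {q : List Int} {P P' : Nat → Bool} (h : QInv n q P)
    (he : Eqn n P P') : QInv n q P' :=
  ⟨h.1, fun c hc => by rw [h.2 c hc, he c hc]⟩

theorem getD_set_self (l : List Int) (a : Nat) (v : Int) (h : a < l.length) :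
    (l.set a v).getD a 0 = v := by
  simp [List.getD_eq_getElem?_getD, List.getElem?_set_self h]

theorem q0_inv (n : Nat) (hn : 0 < n) : QInv n ((List.replicate n (0:Int)).set 0 1) (pwf n 0) := by
  refine ⟨by simp, fun c hc => ?_⟩
  rcases Nat.eq_zero_or_pos c with h | h
  · subst h
    rw [getD_set_self _ _ _ (by simpa using hn)]
    simp [pwf]
  · rw [getD_set_ne _ _ _ _ (by omega)]
    simp only [pwf, List.getD_eq_getElem?_getD, List.getElem?_replicate]
    rw [if_pos hc]
    simp [show ¬ (c = 0) from by omega]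

theorem if_bxor_one (b : Bool) :
    PySem.Int.bxor (if b then (1:Int) else 0) 1 = if b.xor true then (1:Int) else 0 := by
  cases b <;> decide

theorem bxor_if_if (a b : Bool) :
    PySem.Int.bxor (if a then (1:Int) else 0) (if b then (1:Int) else 0)
      = if a.xor b then (1:Int) else 0 := by
  cases a <;> cases b <;> decide

theorem sqStep_partial {n : Nat} (hn : 0 < n) {q : List Int} {P : Nat → Bool} (hq : QInv n q P) :
    ∀ k, k ≤ n →
      ((List.range k).foldl (fun r c =>
          if q.getD c 0 ≠ 0 then r.set (2 * c % n) (PySem.Int.bxor (r.getD (2 * c % n) 0) 1) else r)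
        (List.replicate n 0)).length = n ∧
      ∀ d < n, ((List.range k).foldl (fun r c =>
          if q.getD c 0 ≠ 0 then r.set (2 * c % n) (PySem.Int.bxor (r.getD (2 * c % n) 0) 1) else r)
        (List.replicate n 0)).getD d 0
        = if bxf (List.range k) (fun c' => decide (2 * c' % n = d) && P c') then 1 else 0 := by
  intro k
  induction k with
  | zero =>
      intro _
      refine ⟨by simp, fun d hd => ?_⟩
      simp [bxf, List.getD_eq_getElem?_getD, List.getElem?_replicate, if_pos hd]
  | succ k ih =>
      intro hk
      obtain ⟨hlen, hval⟩ := ih (by omega)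
      rw [List.range_succ, List.foldl_append]
      simp only [List.foldl_cons, List.foldl_nil]
      constructor
      · by_cases hb : q.getD k 0 ≠ 0
        · rw [if_pos hb]; simpa using hlen
        · rw [if_neg hb]; exact hlen
      · intro d hd
        have hPk : q.getD k 0 = if P k then 1 else 0 := hq.2 k (by omega)
        have hmod : 2 * k % n < n := Nat.mod_lt _ hn
        by_cases hP : P k
        · have hb : q.getD k 0 ≠ 0 := by rw [hPk, if_pos hP]; norm_num
          rw [if_pos hb]
          rw [bxf_append_singleton]
          by_cases hdm : d = 2 * k % n
          · subst hdm
            rw [getD_set_self _ _ _ (by omega), hval _ hd]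
            rw [if_bxor_one]
            congr 1
            simp [hP]
          · rw [getD_set_ne _ _ _ _ (by omega), hval _ hd]
            congr 1
            have : decide (2 * k % n = d) = false := by simp; omega
            simp [this]
        · have hb : ¬ q.getD k 0 ≠ 0 := by rw [hPk, if_neg hP]; norm_num
          rw [if_neg hb, bxf_append_singleton, hval _ hd]
          congr 1
          simp [hP]

theorem sqStep_inv {n : Nat} (hn : 0 < n) {q : List Int} {P : Nat → Bool} (hq : QInv n q P) :
    QInv n (sqStep q n) (sqf n P) := by
  obtain ⟨h1, h2⟩ := sqStep_partial hn hq n le_rfl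
  exact ⟨h1, fun c hc => h2 c hc⟩

theorem mulStep_inv {n : Nat} (hn : 0 < n) {q : List Int} {P : Nat → Bool} (hq : QInv n q P) :
    QInv n (mulStep q n) (addf P (rotf n (n - 1) P)) := by
  refine ⟨by simp [mulStep], fun c hc => ?_⟩
  rw [mulStep, PySem.List.getD_map_range _ _ _ _ hc]
  have hrot : rotf n (n - 1) P c = P ((c + (n - 1)) % n) := rfl
  rcases Nat.eq_zero_or_pos c with h0 | h0
  · subst h0
    have hne : q ≠ [] := by
      intro h
      have := hq.1
      rw [h] at this
      simp at this
      omega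
    rw [show ((0 : Nat) : Int) - 1 = (-1 : Int) from by norm_num]
    rw [PySem.List.pyGetD_neg_one q 0 hne]
    have : q.getLast hne = q.getD (n - 1) 0 := by
      rw [List.getLast_eq_getElem, List.getD_eq_getElem?_getD,
          List.getElem?_eq_getElem (show n - 1 < q.length from by rw [hq.1]; omega)]
      simp only [Option.getD_some]
      congr 1
      rw [hq.1]
    rw [this, hq.2 0 hn, hq.2 (n - 1) (by omega), bxor_if_if]
    simp only [addf, hrot]
    congr 2
    rw [Nat.zero_add, Nat.mod_eq_of_lt (by omega)]
  · have : ((c : Nat) : Int) - 1 = (((c - 1 : Nat)) : Int) := by omega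
    rw [this, PySem.List.pyGetD_natCast]
    rw [hq.2 c hc, hq.2 (c - 1) (by omega), bxor_if_if]
    simp only [addf, hrot]
    congr 2
    rw [show c + (n - 1) = n + (c - 1) from by omega, Nat.add_mod_left, Nat.mod_eq_of_lt (by omega)]

theorem bits_fold {n : Nat} (hn : 0 < n) :
    ∀ (e p : Nat) (q : List Int), QInv n q (pwf n p) →
      QInv n ((bitsOf e).foldl (fun q b =>
          let q' := sqStep q n
          if b then mulStep q' n else q') q)
        (pwf n (p * 2 ^ (bitsOf e).length + e)) := by
  intro e
  induction e using Nat.strong_induction_on with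
  | _ e IH =>
    intro p q hq
    by_cases he : e = 0
    · subst he
      rw [show bitsOf 0 = [] from by rw [bitsOf]; simp]
      simpa using hq
    · rw [show bitsOf e = bitsOf (e / 2) ++ [decide (e % 2 = 1)] from by rw [bitsOf, if_neg he]]
      rw [List.foldl_append]
      have hrec := IH (e / 2) (by omega) p q hq
      set q1 := (bitsOf (e / 2)).foldl (fun q b =>
          let q' := sqStep q n
          if b then mulStep q' n else q') q with hq1
      set p1 := p * 2 ^ (bitsOf (e / 2)).length + e / 2 with hp1
      simp only [List.foldl_cons, List.foldl_nil]
      have hsq : QInv n (sqStep q1 n) (pwf n (2 * p1)) :=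
        QInv_congr (sqStep_inv hn hrec) (pw_frob n hn p1).symm'
      have hL : (bitsOf (e / 2) ++ [decide (e % 2 = 1)]).length = (bitsOf (e / 2)).length + 1 := by
        simp
      rw [hL]
      by_cases hbit : e % 2 = 1
      · rw [if_pos (by simpa using hbit)]
        have hm : QInv n (mulStep (sqStep q1 n) n) (pwf n (2 * p1 + 1)) := by
          have := mulStep_inv hn hsq
          exact this
        have harith : 2 * p1 + 1 = p * 2 ^ ((bitsOf (e / 2)).length + 1) + e := by
          have he2 : e = 2 * (e / 2) + 1 := by omega
          rw [hp1, pow_succ]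
          rw [show p * (2 ^ (bitsOf (e / 2)).length * 2)
              = p * 2 ^ (bitsOf (e / 2)).length * 2 from by ring]
          omega
        rw [← harith]
        exact hm
      · rw [if_neg (by simpa using hbit)]
        have harith : 2 * p1 = p * 2 ^ ((bitsOf (e / 2)).length + 1) + e := by
          have he2 : e = 2 * (e / 2) := by omega
          rw [hp1, pow_succ]
          rw [show p * (2 ^ (bitsOf (e / 2)).length * 2)
              = p * 2 ^ (bitsOf (e / 2)).length * 2 from by ring]
          omega
        rw [← harith]
        exact hsq

theorem foldl_bxor (l : List Nat) (f : Nat → Int) :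
    ∀ b, l.foldl (fun a c => PySem.Int.bxor a (f c)) b = PySem.Int.bxor b (ixf l f) := by
  induction l with
  | nil => intro b; rw [ixf_nil, bxor_zero']; rfl
  | cons x xs ih =>
      intro b
      rw [List.foldl_cons, ih, ixf_cons, ← bxor_assoc]

theorem gather_eq (row q : List Int) (P : Nat → Bool) (hq : QInv row.length q P) :
    gatherRow row q row.length = (List.range row.length).map (Gf row P) := by
  refine List.map_congr_left (fun i _ => ?_)
  have h1 : (List.range row.length).foldl (fun acc c =>
        if q.getD c 0 ≠ 0 then PySem.Int.bxor acc (row.getD ((i + c) % row.length) 0) else acc) 0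
      = (List.range row.length).foldl (fun acc c =>
        PySem.Int.bxor acc (if P c then row.getD ((i + c) % row.length) 0 else 0)) 0 := by
    refine PySem.List.foldl_congr_mem _ _ _ _ (fun acc c hc => ?_)
    have hc' : c < row.length := List.mem_range.mp hc
    rw [hq.2 c hc']
    by_cases hP : P c
    · rw [if_pos hP, if_pos hP, if_pos (by norm_num)]
    · rw [if_neg hP, if_neg hP, if_neg (by norm_num), bxor_zero']
  rw [h1, foldl_bxor, zero_bxor']
  rfl

theorem xorMatrix_alt_char (m : Int) (row : List Int) (hm : 2 ≤ m) (hn : 0 < row.length) :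
    xorMatrix_alt m row = (List.range row.length).map (Gf row (pwf row.length (m - 1).toNat)) := by
  rw [xorMatrix_alt]
  simp only [if_neg (show ¬ (m - 1 ≤ 0) from by omega)]
  have h0 := q0_inv row.length hn
  have hfold := bits_fold hn (m - 1).toNat 0 _ h0
  rw [zero_mul, zero_add] at hfold
  exact gather_eq row _ _ hfold

theorem xorMatrix_main : ∀ (m : Int) (first_row : List Int),
    (m ≤ 1 ∨ first_row ≠ []) → xorMatrix m first_row = xorMatrix_alt m first_row := by
  intro m row hpre
  rcases lt_trichotomy m 1 with hm | hm | hm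
  · rw [xorMatrix, if_neg (by omega), loopA, if_neg (by omega)]
    rw [xorMatrix_alt]
    simp only [if_pos (show m - 1 ≤ 0 from by omega)]
  · subst hm
    rw [xorMatrix, if_pos rfl, xorMatrix_alt]
    simp only [if_pos (show (1:Int) - 1 ≤ 0 from by norm_num)]
  · have hm2 : 2 ≤ m := by omega
    have hrow : row ≠ [] := by
      rcases hpre with h | h
      · omega
      · exact h
    have hn : 0 < row.length := List.length_pos_iff.mpr hrow
    rw [xorMatrix_char m row hm2 hn, xorMatrix_alt_char m row hm2 hn]

-- ===== VERDICT (by name: the statement is the Claim_ definition above) =====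
theorem xorMatrix_spec : Claim_equal_xorMatrix := by
  intro m first_row _ hpre
  unfold Spec_xorMatrix
  exact xorMatrix_main m first_row hpre
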